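-- pv_equiv track=rewrite | github.com/kdawar1/generalized_euler | Project Euler/euler39.py | pyth_perimeter
-- ===== SOURCE A (Python) =====
-- def pyth_perimeter(limit):
--     ans = 0
--     solutions = 0
--     for i in range(2,limit+1,2):
--         num_sol = 0
--         for j in range(2, i//3 + 1):
--             if i*(i-2*j) % (2*(i-j)) == 0:
--                 num_sol +=1
--         if num_sol > solutions:
--             solutions = num_sol
--             ans = i
--
--     return ans
-- ===== SOURCE B (Python) =====
-- def pyth_perimeter(limit):
--     # Count, per perimeter p, the legs a admitting a Pythagorean triple,
--     # with the loops interchanged (sieve over a, then p) into a dict counter,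
--     # then scan the perimeters once for the first maximum.
--     cnt = {}
--     for a in range(2, limit // 3 + 1):
--         start = 3 * a + (3 * a) % 2
--         for p in range(start, limit + 1, 2):
--             if (p * p) % (2 * (p - a)) == 0:
--                 cnt[p] = cnt.get(p, 0) + 1
--     ans = 0
--     best = 0
--     for p in range(2, limit + 1, 2):
--         c = cnt.get(p, 0)
--         if c > best:
--             best = c
--             ans = p
--     return ans
-- ===== Notes on version B (the rewrite author's own statement) =====
-- stated objective: alternative
-- what changed: A's per-perimeter inner scan over the smaller leg is interchanged into a sieve over the leg that accumulates per-perimeter counts in a dict (with the remainder test rewritten to an equivalent divisibility of the squared perimeter), followed by a single scan of the counts for the first maximum.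
import Mathlib
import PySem

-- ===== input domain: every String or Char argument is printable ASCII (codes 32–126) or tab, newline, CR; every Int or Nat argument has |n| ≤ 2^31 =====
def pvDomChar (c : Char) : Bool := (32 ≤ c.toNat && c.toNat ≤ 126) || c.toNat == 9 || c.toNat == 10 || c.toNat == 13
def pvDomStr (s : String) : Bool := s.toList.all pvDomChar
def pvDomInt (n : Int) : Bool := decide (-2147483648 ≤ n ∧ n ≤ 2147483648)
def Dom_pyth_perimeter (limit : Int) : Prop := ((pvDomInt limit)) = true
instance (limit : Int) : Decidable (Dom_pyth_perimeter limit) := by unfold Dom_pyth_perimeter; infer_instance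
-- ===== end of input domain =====

-- B interchanges A's two loops into a dict-counter sieve over the smaller leg, then scans the
-- perimeters once for the first maximum (objective: alternative traversal order; same result).

-- ===== PORT A =====
def pyth_perimeter (limit : Int) : Int :=
  ((PySem.List.pyRange 2 (limit + 1) 2).foldl
    (fun (st : Int × Int) i =>
      let num_sol : Int :=
        (PySem.List.pyRange 2 (PySem.Int.floordiv i 3 + 1) 1).foldl
          (fun num_sol j =>
            if PySem.Int.mod (i * (i - 2 * j)) (2 * (i - j)) = 0 then num_sol + 1 else num_sol)
          0
      if num_sol > st.2 then (i, num_sol) else st)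
    (0, 0)).1

-- ===== PORT B =====
-- first phase of B: the dict counter cnt
def bCount (limit : Int) : PySem.Dict Int Int :=
  (PySem.List.pyRange 2 (PySem.Int.floordiv limit 3 + 1) 1).foldl
    (fun cnt a =>
      (PySem.List.pyRange (3 * a + PySem.Int.mod (3 * a) 2) (limit + 1) 2).foldl
        (fun cnt p =>
          if PySem.Int.mod (p * p) (2 * (p - a)) = 0 then cnt.insert p (cnt.getD p 0 + 1) else cnt)
        cnt)
    PySem.Dict.empty

def pyth_perimeter_alt (limit : Int) : Int :=
  let cnt := bCount limit
  ((PySem.List.pyRange 2 (limit + 1) 2).foldl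
    (fun (st : Int × Int) p =>
      let c : Int := cnt.getD p 0
      if c > st.2 then (p, c) else st)
    (0, 0)).1

-- ===== PRECONDITION & SPEC =====
def Spec_pyth_perimeter (limit : Int) (out : Int) : Prop := out = pyth_perimeter_alt limit
instance (limit : Int) (out : Int) : Decidable (Spec_pyth_perimeter limit out) := by unfold Spec_pyth_perimeter; infer_instance

-- ===== CLAIM (what is proved, stated in full; the proofs are below) =====
def Claim_equal_pyth_perimeter : Prop := ∀ (limit : Int), Dom_pyth_perimeter limit → Spec_pyth_perimeter limit (pyth_perimeter limit)

-- ===== LEMMAS AND PROOFS =====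

-- a step-2 range has no duplicates
lemma nodup_pyRange_two (a b : Int) : (PySem.List.pyRange a b 2).Nodup := by
  rw [PySem.List.pyRange_of_pos a b (by norm_num)]
  exact List.Nodup.map (fun x y h => by omega) List.nodup_range

-- an even p ≤ limit with 3*a ≤ p lies in B's inner range for a
lemma mem_inner_range (limit p a : Int) (hpe : 2 ∣ p) (hpl : p ≤ limit) (h3 : 3 * a ≤ p) :
    p ∈ PySem.List.pyRange (3 * a + PySem.Int.mod (3 * a) 2) (limit + 1) 2 := by
  rw [PySem.List.mem_pyRange_iff_of_pos (by norm_num)]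
  have hfm := PySem.Int.floordiv_mul_add_mod (3 * a) 2
  rcases PySem.Int.mod_two_eq (3 * a) with h | h <;> rw [h] at hfm ⊢ <;> omega

-- B's divisibility test is A's: both say 2*(p-a) divides p*p
lemma dvd_flip (p a : Int) : (2 * (p - a) ∣ p * p) ↔ (2 * (p - a) ∣ p * (p - 2 * a)) := by
  constructor <;> intro h
  · have := dvd_sub (dvd_mul_right (2 * (p - a)) p) h
    convert this using 1; ring
  · have := dvd_sub (dvd_mul_right (2 * (p - a)) p) h
    convert this using 1; ring

-- how many times B's inner loop for leg a hits perimeter p (with 3*a ≤ p): A's 0/1 test at j = a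
lemma hits_eq (limit p a : Int) (hpe : 2 ∣ p) (hpl : p ≤ limit) (h3 : 3 * a ≤ p) :
    ((((PySem.List.pyRange (3 * a + PySem.Int.mod (3 * a) 2) (limit + 1) 2).filter
        (fun q => decide (PySem.Int.mod (q * q) (2 * (q - a)) = 0))).count p : Nat) : Int)
      = if PySem.Int.mod (p * (p - 2 * a)) (2 * (p - a)) = 0 then 1 else 0 := by
  have hmem := mem_inner_range limit p a hpe hpl h3
  by_cases hc : PySem.Int.mod (p * p) (2 * (p - a)) = 0
  · rw [List.count_filter (by simpa using hc),
      List.count_eq_one_of_mem (nodup_pyRange_two _ _) hmem, if_pos]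
    · rfl
    · rw [PySem.Int.mod_eq_zero_iff_dvd] at hc ⊢
      exact (dvd_flip p a).mp hc
  · rw [List.count_eq_zero_of_not_mem
      (fun hmf => hc (by simpa using (List.mem_filter.mp hmf).2)), if_neg]
    · rfl
    · intro hA
      rw [PySem.Int.mod_eq_zero_iff_dvd] at hA hc
      exact hc ((dvd_flip p a).mpr hA)

-- when 3*a > p, B's inner loop for leg a never touches perimeter p
lemma hits_zero (limit p a : Int) (h : p < 3 * a) :
    ((((PySem.List.pyRange (3 * a + PySem.Int.mod (3 * a) 2) (limit + 1) 2).filter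
        (fun q => decide (PySem.Int.mod (q * q) (2 * (q - a)) = 0))).count p : Nat) : Int) = 0 := by
  rw [List.count_eq_zero_of_not_mem]
  · rfl
  · intro hmf
    have hm := (List.mem_filter.mp hmf).1
    rw [PySem.List.mem_pyRange_iff_of_pos (by norm_num)] at hm
    have hm0 := PySem.Int.mod_nonneg (3 * a) (b := 2) (by norm_num)
    omega

-- unrolling B's nested counting fold: getD is the old value plus one hit count per leg a
lemma foldl_count_getD (limit p : Int) (as : List Int) (d : PySem.Dict Int Int) :
    ((as.foldl
        (fun cnt a =>
          (PySem.List.pyRange (3 * a + PySem.Int.mod (3 * a) 2) (limit + 1) 2).foldl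
            (fun cnt q =>
              if PySem.Int.mod (q * q) (2 * (q - a)) = 0 then cnt.insert q (cnt.getD q 0 + 1) else cnt)
            cnt)
        d).getD p 0)
      = d.getD p 0 +
        ((as.map (fun a =>
          ((((PySem.List.pyRange (3 * a + PySem.Int.mod (3 * a) 2) (limit + 1) 2).filter
              (fun q => decide (PySem.Int.mod (q * q) (2 * (q - a)) = 0))).count p : Nat) : Int))).sum) := by
  induction as generalizing d with
  | nil => simp
  | cons a as ih =>
    simp only [List.foldl_cons, List.map_cons, List.sum_cons]
    rw [ih, PySem.List.foldl_ite_eq_foldl_filter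
        (fun q => PySem.Int.mod (q * q) (2 * (q - a)) = 0)
        (fun (cnt : PySem.Dict Int Int) q => cnt.insert q (cnt.getD q 0 + 1)),
      PySem.Dict.getD_foldl_insert_add_one]
    ring

-- the sieve's total count at an even perimeter p ≤ limit is A's inner count
lemma sum_hits_eq_countP (limit p : Int) (h2 : 2 ≤ p) (hpl : p ≤ limit) (hpe : 2 ∣ p) :
    ((PySem.List.pyRange 2 (PySem.Int.floordiv limit 3 + 1) 1).map (fun a =>
        ((((PySem.List.pyRange (3 * a + PySem.Int.mod (3 * a) 2) (limit + 1) 2).filter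
            (fun q => decide (PySem.Int.mod (q * q) (2 * (q - a)) = 0))).count p : Nat) : Int))).sum
      = (((PySem.List.pyRange 2 (PySem.Int.floordiv p 3 + 1) 1).countP
          (fun j => decide (PySem.Int.mod (p * (p - 2 * j)) (2 * (p - j)) = 0)) : Nat) : Int) := by
  have hfp := PySem.Int.floordiv_mul_add_mod p 3
  have hfp0 := PySem.Int.mod_nonneg p (b := 3) (by norm_num)
  have hfp3 := PySem.Int.mod_lt p (b := 3) (by norm_num)
  by_cases h6 : 6 ≤ p
  · have hfl := PySem.Int.floordiv_mul_add_mod limit 3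
    have hfl0 := PySem.Int.mod_nonneg limit (b := 3) (by norm_num)
    have hm2 : (2 : Int) ≤ PySem.Int.floordiv p 3 + 1 := by omega
    have hmL : PySem.Int.floordiv p 3 + 1 ≤ PySem.Int.floordiv limit 3 + 1 := by
      have := (PySem.Int.le_floordiv_iff_mul_le
        (a := limit) (b := 3) (q := PySem.Int.floordiv p 3) (by norm_num)).mpr (by omega)
      omega
    rw [PySem.List.pyRange_one_append 2 (PySem.Int.floordiv p 3 + 1)
        (PySem.Int.floordiv limit 3 + 1) hm2 hmL,
      List.map_append, List.sum_append]
    have hhead : ((PySem.List.pyRange 2 (PySem.Int.floordiv p 3 + 1) 1).map (fun a =>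
        ((((PySem.List.pyRange (3 * a + PySem.Int.mod (3 * a) 2) (limit + 1) 2).filter
            (fun q => decide (PySem.Int.mod (q * q) (2 * (q - a)) = 0))).count p : Nat) : Int)))
        = (PySem.List.pyRange 2 (PySem.Int.floordiv p 3 + 1) 1).map (fun a =>
            if PySem.Int.mod (p * (p - 2 * a)) (2 * (p - a)) = 0 then 1 else 0) := by
      refine List.map_congr_left (fun a ha => ?_)
      have hma := (PySem.List.mem_pyRange_one.mp ha)
      exact hits_eq limit p a hpe hpl (by omega)
    have htail : ((PySem.List.pyRange (PySem.Int.floordiv p 3 + 1)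
        (PySem.Int.floordiv limit 3 + 1) 1).map (fun a =>
        ((((PySem.List.pyRange (3 * a + PySem.Int.mod (3 * a) 2) (limit + 1) 2).filter
            (fun q => decide (PySem.Int.mod (q * q) (2 * (q - a)) = 0))).count p : Nat) : Int))).sum = 0 := by
      refine List.sum_eq_zero (fun x hx => ?_)
      obtain ⟨a, ha, rfl⟩ := List.mem_map.mp hx
      have hma := (PySem.List.mem_pyRange_one.mp ha)
      exact hits_zero limit p a (by omega)
    rw [hhead, htail, add_zero, ← PySem.List.sum_map_ite_one_zero]
    simp only [decide_eq_true_eq]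
  · have hnil : PySem.List.pyRange 2 (PySem.Int.floordiv p 3 + 1) 1 = [] :=
      PySem.List.pyRange_one_eq_nil (by omega)
    rw [hnil, List.countP_nil]
    refine Eq.trans (List.sum_eq_zero (fun x hx => ?_)) (by simp)
    obtain ⟨a, ha, rfl⟩ := List.mem_map.mp hx
    have hma := (PySem.List.mem_pyRange_one.mp ha)
    exact hits_zero limit p a (by omega)

-- the dict value B looks up equals A's inner-loop count (in the form the unrolled fold leaves it)
lemma bCount_getD (limit p : Int) (h2 : 2 ≤ p) (hpl : p ≤ limit) (hpe : 2 ∣ p) :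
    (bCount limit).getD p 0
      = 0 + (((PySem.List.pyRange 2 (PySem.Int.floordiv p 3 + 1) 1).countP
          (fun j => decide (PySem.Int.mod (p * (p - 2 * j)) (2 * (p - j)) = 0)) : Nat) : Int) := by
  unfold bCount
  rw [foldl_count_getD, PySem.Dict.getD_empty, sum_hits_eq_countP limit p h2 hpl hpe]

-- ===== VERDICT (by name: the statement is the Claim_ definition above) =====
theorem pyth_perimeter_spec : Claim_equal_pyth_perimeter := by
  intro limit _
  unfold Spec_pyth_perimeter pyth_perimeter pyth_perimeter_alt
  refine congrArg Prod.fst ?_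
  refine PySem.List.foldl_congr_mem _ _ _ _ (fun st p hp => ?_)
  have hmem := (PySem.List.mem_pyRange_iff_of_pos (by norm_num) p).mp hp
  simp only []
  rw [PySem.List.foldl_ite_add_one (fun j => PySem.Int.mod (p * (p - 2 * j)) (2 * (p - j)) = 0),
    ← bCount_getD limit p (by omega) (by omega) (by omega)]
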